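-- pv_equiv track=rewrite | github.com/ishanvepa/pop-music-comparative-analyzer | billboard_scraper.py | get_artists
-- ===== SOURCE A (Python) =====
-- def findnth(word, subword, n):
--     parts = word.split(subword, n + 1)
--     if len(parts) <= n + 1:
--         return -1
--     return len(word) - len(parts[-1]) - len(subword)
--
-- def get_artists(html):
--     artists_whole_index = []
--     artists_end_index = []
--     for k in range(10):
--         artists_end_index.insert(k, (findnth(html, "ye-chart-item__expand-caret", k) - 32))
--         artists_end_index[k] = int(artists_end_index[k])
--         artists_whole_index.insert(k, (findnth(html, "ye-chart-item__artist", k)))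
--         artists_whole_index[k] = int(artists_whole_index[k])
--     artists = []
--     #retrieve artists and format properly in list
--     for k in range(10):
--         artists.insert(k, html[artists_whole_index[k]:artists_end_index[k]])
--         escape_char = artists[k].find("\n")
--         while escape_char > 0:
--             escape_char = artists[k].find("\n") + 1
--             artists[k] = artists[k][escape_char:]
--     return artists
-- ===== SOURCE B (Python) =====
-- def get_artists(html):
--     ARTIST = "ye-chart-item__artist"
--     CARET = "ye-chart-item__expand-caret"
--     artists = []
--     ca = cc = 0  # search cursors, one per marker
--     for _ in range(10):
--         start = html.find(ARTIST, ca)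
--         if start >= 0:
--             ca = start + len(ARTIST)
--         end = html.find(CARET, cc)
--         if end >= 0:
--             cc = end + len(CARET)
--         piece = html[start:end - 32]
--         escape = piece.find("\n")
--         while escape > 0:
--             escape = piece.find("\n") + 1
--             piece = piece[escape:]
--         artists.append(piece)
--     return artists
-- ===== Notes on version B (the rewrite author's own statement) =====
-- stated objective: alternative
-- what changed: B finds each marker's k-th occurrence with a single forward scan per marker using str.find with an advancing cursor (find's own -1 flows through when occurrences run out), instead of A's findnth which re-splits the whole page with split(sub, k+1) for every k and recovers the index from the split lengths.
import Mathlib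
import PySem

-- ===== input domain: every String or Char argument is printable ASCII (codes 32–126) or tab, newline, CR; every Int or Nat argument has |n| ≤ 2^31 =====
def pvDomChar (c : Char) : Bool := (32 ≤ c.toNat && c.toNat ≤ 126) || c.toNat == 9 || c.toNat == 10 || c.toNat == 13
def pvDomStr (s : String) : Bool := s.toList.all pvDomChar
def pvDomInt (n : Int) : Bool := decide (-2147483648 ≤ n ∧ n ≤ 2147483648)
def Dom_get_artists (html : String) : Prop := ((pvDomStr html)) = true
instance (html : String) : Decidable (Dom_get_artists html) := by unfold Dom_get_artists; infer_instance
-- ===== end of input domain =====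

-- B replaces A's per-k findnth (a full str.split of the page for every k) with one advancing
-- str.find cursor per marker; the newline-trim loop is the same in both Pythons, so one
-- helper (trimLoop) serves both ports. Return values are proved identical on every input.

-- ===== PORT A =====
def caretLit : List Char := "ye-chart-item__expand-caret".toList
def artistLit : List Char := "ye-chart-item__artist".toList

-- findnth: word.split(subword, n + 1); str.split never returns an empty list, so the
-- IndexError branch of parts[-1] is unreachable and getD [] is an unreachable default
def findnth (word sub : List Char) (n : Int) : Int :=
  let parts := PySem.Chars.splitOnMax word sub (n + 1)
  if (parts.length : Int) ≤ n + 1 then -1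
  else (word.length : Int) - (((PySem.List.pyGet? parts (-1)).getD []).length : Int) - (sub.length : Int)

-- termination helper for the while-loop port below (cited by its decreasing_by)
theorem trim_term_aux (s : List Char) (h : ¬ PySem.Chars.find s ['\n'] = -1) :
    (PySem.Chars.slice s (some (PySem.Chars.find s ['\n'] + 1)) none).length < s.length := by
  have h0 : 0 ≤ PySem.Chars.find s ['\n'] := by
    have := PySem.Chars.neg_one_le_find s ['\n']; omega
  have hlen := PySem.Chars.find_le_length s ['\n']
  have hinf : ['\n'] <:+: s := (PySem.Chars.find_nonneg_iff s ['\n']).1 h0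
  have hpos : 0 < s.length := by
    rcases hinf with ⟨l, r, hs⟩; simp [← hs]
  rw [PySem.Chars.slice_eq_listSlice, PySem.List.slice_from _ (by omega)]
  simp only [List.length_drop]
  omega

-- the 'while escape_char > 0' newline-trimming loop (textually identical in A and in B)
def trimLoop (s : List Char) (esc : Int) : List Char :=
  if 0 < esc then
    let e := PySem.Chars.find s ['\n'] + 1
    trimLoop (PySem.Chars.slice s (some e) none) e
  else s
termination_by (s.length, esc.toNat)
decreasing_by
  by_cases h : PySem.Chars.find s ['\n'] = -1
  · apply Prod.Lex.right'
    · rw [h]; simp [PySem.Chars.slice_eq_listSlice, PySem.List.slice_some_none, PySem.List.clampIdx]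
    · rw [h]; omega
  · exact Prod.Lex.left _ _ (trim_term_aux s h)

-- the two 'lst[k] = int(lst[k])' statements are the identity on an int, ported as no-ops;
-- in the second loop both index lists have length 10, so the getD 0 defaults are unreachable
def get_artists (html : String) : List String :=
  let h := html.toList
  let idxs := (PySem.List.pyRange 0 10 1).foldl
      (fun (st : List Int × List Int) k =>
        (PySem.List.insert st.1 k (findnth h caretLit k - 32),
         PySem.List.insert st.2 k (findnth h artistLit k)))
      ([], [])
  let artists := (PySem.List.pyRange 0 10 1).foldl
      (fun (acc : List (List Char)) k =>
        let acc' := PySem.List.insert acc k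
            (PySem.Chars.slice h (some ((PySem.List.pyGet? idxs.2 k).getD 0))
              (some ((PySem.List.pyGet? idxs.1 k).getD 0)))
        let s := (PySem.List.pyGet? acc' k).getD []
        acc'.set k.toNat (trimLoop s (PySem.Chars.find s ['\n'])))
      []
  artists.map (fun cs => String.ofList cs)

-- ===== PORT B =====
-- the body of B's for-loop; state = (ca, cc, artists); html.find(sub, cursor) is
-- PySem.Chars.findFrom, exact Python semantics including the -1 when occurrences run out
def loopBody (h : List Char) (st : Int × Int × List (List Char)) (_k : Int) :
    Int × Int × List (List Char) :=
  let start := PySem.Chars.findFrom h artistLit st.1 none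
  let ca := if 0 ≤ start then start + (artistLit.length : Int) else st.1
  let e := PySem.Chars.findFrom h caretLit st.2.1 none
  let cc := if 0 ≤ e then e + (caretLit.length : Int) else st.2.1
  let piece := PySem.Chars.slice h (some start) (some (e - 32))
  (ca, cc, st.2.2 ++ [trimLoop piece (PySem.Chars.find piece ['\n'])])

def get_artists_alt (html : String) : List String :=
  let h := html.toList
  let res := (PySem.List.pyRange 0 10 1).foldl (loopBody h) (0, 0, [])
  res.2.2.map (fun cs => String.ofList cs)

-- ===== PRECONDITION & SPEC =====
def Spec_get_artists (html : String) (out : List String) : Prop := out = get_artists_alt html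
instance (html : String) (out : List String) : Decidable (Spec_get_artists html out) := by unfold Spec_get_artists; infer_instance

-- ===== CLAIM (what is proved, stated in full; the proofs are below) =====
def Claim_equal_get_artists : Prop := ∀ (html : String), Dom_get_artists html → Spec_get_artists html (get_artists html)

-- ===== LEMMAS AND PROOFS =====

theorem find_eq_of_first {s sub : List Char} {m : Nat}
    (hpre : sub <+: s.drop m) (hmin : ∀ i < m, ¬ sub <+: s.drop i) :
    PySem.Chars.find s sub = (m : Int) := by
  have hinf : sub <:+: s := hpre.isInfix.trans (List.drop_suffix m s).isInfix
  have h0 : 0 ≤ PySem.Chars.find s sub := (PySem.Chars.find_nonneg_iff s sub).2 hinf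
  obtain ⟨hp, hmn⟩ := PySem.Chars.find_spec h0
  rcases lt_trichotomy (PySem.Chars.find s sub).toNat m with hlt | heq | hgt
  · exact absurd hp (hmin _ hlt)
  · omega
  · exact absurd hpre (hmn _ hgt)

theorem pre_le_len {s sub : List Char} {m : Nat} (hsub : sub ≠ []) (hpre : sub <+: s.drop m) :
    m < s.length := by
  have h1 := hpre.length_le
  have h2 : 0 < sub.length := List.length_pos_of_ne_nil hsub
  simp [List.length_drop] at h1
  omega

-- the list of start indices of the (non-overlapping) occurrences of sub in s, in order
def occW (sub : List Char) (hsub : sub ≠ []) (s : List Char) : List Nat :=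
  let f := PySem.Chars.find s sub
  if h : f = -1 then []
  else (f.toNat) :: (occW sub hsub (s.drop (f.toNat + sub.length))).map (· + (f.toNat + sub.length))
termination_by s.length
decreasing_by
  have h0 : 0 ≤ PySem.Chars.find s sub := by
    have := PySem.Chars.neg_one_le_find s sub; omega
  have hinf : sub <:+: s := (PySem.Chars.find_nonneg_iff s sub).1 h0
  have hpos : 0 < s.length := by
    rcases hinf with ⟨l, r, hs⟩
    have : 0 < sub.length := List.length_pos_of_ne_nil hsub
    simp [← hs]; omega
  have hl : 0 < sub.length := List.length_pos_of_ne_nil hsub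
  simp only [List.length_drop]; omega

def splitW (sep : List Char) (hsep : sep ≠ []) (m : Nat) (s : List Char) : List (List Char) :=
  let f := PySem.Chars.find s sep
  if h : m = 0 ∨ f = -1 then [s]
  else s.take f.toNat :: splitW sep hsep (m - 1) (s.drop (f.toNat + sep.length))
termination_by s.length
decreasing_by
  have h0 : 0 ≤ PySem.Chars.find s sep := by
    have := PySem.Chars.neg_one_le_find s sep; omega
  have hinf : sep <:+: s := (PySem.Chars.find_nonneg_iff s sep).1 h0
  have hpos : 0 < s.length := by
    rcases hinf with ⟨l, r, hs⟩
    have : 0 < sep.length := List.length_pos_of_ne_nil hsep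
    simp [← hs]; omega
  have hl : 0 < sep.length := List.length_pos_of_ne_nil hsep
  simp only [List.length_drop]; omega

def prependFirst (p : List Char) : List (List Char) → List (List Char)
  | [] => [p]
  | x :: t => (p ++ x) :: t

-- the k-th occurrence index, -1 when there are fewer than k+1 occurrences
def occIdx (xs : List Nat) (n : Nat) : Int :=
  match xs[n]? with
  | some v => (v : Int)
  | none => -1

theorem splitW_ne_nil (sep : List Char) (hsep : sep ≠ []) (m : Nat) (s : List Char) :
    splitW sep hsep m s ≠ [] := by
  rw [splitW]; split <;> simp

theorem prependFirst_nil {xs : List (List Char)} (h : xs ≠ []) : prependFirst [] xs = xs := by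
  cases xs with
  | nil => exact absurd rfl h
  | cons x t => simp [prependFirst]

theorem find_nil_of_ne {sub : List Char} (hsub : sub ≠ []) :
    PySem.Chars.find [] sub = -1 := by
  rw [PySem.Chars.find_eq_neg_one_iff]
  intro hinf
  exact hsub (List.eq_nil_of_infix_nil hinf)

theorem prefix_le_of_drop {s sub : List Char} {m : Nat} (hsub : sub ≠ []) (h : sub <+: s.drop m) :
    m + sub.length ≤ s.length := by
  have h1 := h.length_le
  simp [List.length_drop] at h1
  have := pre_le_len hsub h
  omega

theorem splitGo_eq (sep : List Char) (hsep : sep ≠ []) :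
    ∀ (fuel : Nat) (s : List Char) (m : Nat) (cur : List Char) (acc : List (List Char)),
      s.length < fuel →
      PySem.Chars.splitOnMax.go sep fuel m s cur acc =
        acc.reverse ++ prependFirst cur.reverse (splitW sep hsep m s) := by
  intro fuel
  induction fuel with
  | zero => intro s m cur acc h; omega
  | succ F ih =>
    intro s m cur acc h
    cases s with
    | nil =>
      rw [PySem.Chars.splitOnMax.go, splitW]
      all_goals try omega
      rw [dif_pos (Or.inr (find_nil_of_ne hsep))]
      simp [prependFirst]
    | cons c rest =>
      by_cases hm1 : m = 0
      · subst hm1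
        rw [PySem.Chars.splitOnMax.go, splitW]
        simp [prependFirst]
      · by_cases hpre : sep.isPrefixOf (c :: rest) = true
        · rw [PySem.Chars.splitOnMax.go]
          rw [if_neg hm1, if_pos hpre]
          have hlsep : 0 < sep.length := List.length_pos_of_ne_nil hsep
          have hrec : (List.drop sep.length (c :: rest)).length < F := by
            simp only [List.length_drop, List.length_cons] at *
            omega
          rw [ih _ _ _ _ hrec]
          have hf0 : PySem.Chars.find (c :: rest) sep = 0 := by
            have hpp : sep <+: (c :: rest).drop 0 := by
              simpa using (List.isPrefixOf_iff_prefix).1 hpre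
            simpa using find_eq_of_first hpp (by omega)
          conv_rhs => rw [splitW]
          rw [dif_neg (by push_neg; exact ⟨hm1, by rw [hf0]; omega⟩)]
          rw [hf0]
          simp only [Int.toNat_zero, List.take_zero, Nat.zero_add, List.reverse_nil]
          rw [prependFirst_nil (splitW_ne_nil _ _ _ _)]
          simp [prependFirst, List.reverse_cons]
        · rw [PySem.Chars.splitOnMax.go]
          rw [if_neg hm1, if_neg hpre]
          have hrec : rest.length < F := by simp at h; omega
          rw [ih _ _ _ _ hrec]
          by_cases hinf : sep <:+: rest
          · have h0' : 0 ≤ PySem.Chars.find rest sep := (PySem.Chars.find_nonneg_iff rest sep).2 hinf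
            obtain ⟨hp', hmn'⟩ := PySem.Chars.find_spec h0'
            have hfc : PySem.Chars.find (c :: rest) sep =
                (((PySem.Chars.find rest sep).toNat + 1 : Nat) : Int) := by
              apply find_eq_of_first
              · simpa using hp'
              · intro i hi
                cases i with
                | zero =>
                  simpa using fun hc => hpre ((List.isPrefixOf_iff_prefix).2 (by simpa using hc))
                | succ i' =>
                  simpa using hmn' i' (by omega)
            have hfcne : ¬ PySem.Chars.find (c :: rest) sep = -1 := by rw [hfc]; omega
            have hfne' : ¬ PySem.Chars.find rest sep = -1 := by omega
            rw [splitW, dif_neg (by push_neg; exact ⟨hm1, hfne'⟩)]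
            conv_rhs => rw [splitW]
            rw [dif_neg (by push_neg; exact ⟨hm1, hfcne⟩)]
            rw [hfc]
            have htn : (((PySem.Chars.find rest sep).toNat + 1 : Nat) : Int).toNat
                = (PySem.Chars.find rest sep).toNat + 1 := by omega
            rw [htn]
            simp only [List.take_succ_cons]
            have hd : List.drop ((PySem.Chars.find rest sep).toNat + 1 + sep.length) (c :: rest)
                = List.drop ((PySem.Chars.find rest sep).toNat + sep.length) rest := by
              have heq : (PySem.Chars.find rest sep).toNat + 1 + sep.length
                  = ((PySem.Chars.find rest sep).toNat + sep.length) + 1 := by omega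
              rw [heq, List.drop_succ_cons]
            rw [hd]
            simp [prependFirst, List.reverse_cons]
          · have hfr : PySem.Chars.find rest sep = -1 := by
              rw [PySem.Chars.find_eq_neg_one_iff]; exact hinf
            have hfc : PySem.Chars.find (c :: rest) sep = -1 := by
              rw [PySem.Chars.find_eq_neg_one_iff]
              intro hinfc
              rcases (List.infix_cons_iff).1 hinfc with h1 | h2
              · exact hpre ((List.isPrefixOf_iff_prefix).2 h1)
              · exact hinf h2
            rw [splitW, dif_pos (Or.inr hfr)]
            conv_rhs => rw [splitW]
            rw [dif_pos (Or.inr hfc)]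
            simp [prependFirst]

theorem splitOnMax_eq (s sep : List Char) (hsep : sep ≠ []) (m : Int) (hm : 0 ≤ m) :
    PySem.Chars.splitOnMax s sep m = splitW sep hsep m.toNat s := by
  rw [PySem.Chars.splitOnMax, if_neg (by omega)]
  rw [splitGo_eq sep hsep (s.length + 1) s m.toNat [] [] (by omega)]
  simp only [List.reverse_nil, List.nil_append]
  exact prependFirst_nil (splitW_ne_nil _ _ _ _)

theorem splitW_length (sep : List Char) (hsep : sep ≠ []) (m : Nat) (s : List Char) :
    (splitW sep hsep m s).length = min m (occW sep hsep s).length + 1 := by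
  induction m, s using splitW.induct sep hsep with
  | case1 m s f hcond =>
    rcases hcond with hm | hf
    · rw [splitW, dif_pos (Or.inl hm), hm]
      simp
    · have hf' : PySem.Chars.find s sep = -1 := hf
      rw [splitW, dif_pos (Or.inr hf'), occW, dif_pos hf']
      simp
  | case2 m s f hcond ih =>
    have hcond' : ¬ (m = 0 ∨ PySem.Chars.find s sep = -1) := hcond
    have hf : ¬ PySem.Chars.find s sep = -1 := fun h => hcond' (Or.inr h)
    rw [splitW, dif_neg hcond', occW, dif_neg hf]
    simp only [List.length_cons, List.length_map]
    rw [show f = PySem.Chars.find s sep from rfl] at ih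
    rw [ih]
    omega

theorem findnth_eq_occIdx (sub : List Char) (hsub : sub ≠ []) :
    ∀ (n : Nat) (s : List Char),
      findnth s sub (n : Int) = occIdx (occW sub hsub s) n := by
  intro n
  induction n with
  | zero =>
    intro s
    rw [findnth]
    rw [show ((0 : Nat) : Int) + 1 = (1 : Int) by omega]
    rw [splitOnMax_eq s sub hsub 1 (by omega)]
    by_cases hf : PySem.Chars.find s sub = -1
    · rw [splitW, dif_pos (Or.inr hf), occW, dif_pos hf]
      simp [occIdx]
    · have h0 : 0 ≤ PySem.Chars.find s sub := by
        have := PySem.Chars.neg_one_le_find s sub; omega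
      obtain ⟨hp, -⟩ := PySem.Chars.find_spec h0
      have hd : (PySem.Chars.find s sub).toNat + sub.length ≤ s.length := prefix_le_of_drop hsub hp
      rw [show (1 : Int).toNat = 1 from rfl]
      rw [splitW, dif_neg (by push_neg; exact ⟨by omega, hf⟩)]
      rw [show (1 : Nat) - 1 = 0 from rfl]
      rw [splitW, dif_pos (Or.inl rfl)]
      rw [occW, dif_neg hf]
      simp only [List.length_cons, List.length_singleton]
      rw [if_neg (by push_cast; omega)]
      simp only [occIdx, List.getElem?_cons_zero]
      have : (PySem.List.pyGet? [List.take (PySem.Chars.find s sub).toNat s,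
          List.drop ((PySem.Chars.find s sub).toNat + sub.length) s] (-1)).getD [] =
          List.drop ((PySem.Chars.find s sub).toNat + sub.length) s := rfl
      rw [this]
      simp only [List.length_drop]
      push_cast
      omega
  | succ N ih =>
    intro s
    rw [findnth]
    rw [splitOnMax_eq s sub hsub _ (by push_cast; omega)]
    have htn : (((N + 1 : Nat) : Int) + 1).toNat = N + 2 := by push_cast; omega
    rw [htn]
    by_cases hf : PySem.Chars.find s sub = -1
    · rw [splitW, dif_pos (Or.inr hf), occW, dif_pos hf]
      simp only [List.length_singleton]
      rw [if_pos (by push_cast; omega)]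
      simp [occIdx]
    · have h0 : 0 ≤ PySem.Chars.find s sub := by
        have := PySem.Chars.neg_one_le_find s sub; omega
      obtain ⟨hp, -⟩ := PySem.Chars.find_spec h0
      have hd : (PySem.Chars.find s sub).toNat + sub.length ≤ s.length := prefix_le_of_drop hsub hp
      rw [splitW, dif_neg (by push_neg; exact ⟨by omega, hf⟩)]
      rw [show (N + 2) - 1 = N + 1 from rfl]
      rw [occW, dif_neg hf]
      set rest := List.drop ((PySem.Chars.find s sub).toNat + sub.length) s with hrest
      have ihr := ih rest
      rw [findnth] at ihr
      rw [splitOnMax_eq rest sub hsub _ (by push_cast; omega)] at ihr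
      have htn2 : ((N : Nat) : Int) + 1 = (((N + 1 : Nat) : Int)) := by push_cast; ring
      rw [htn2] at ihr
      rw [show (((N + 1 : Nat) : Int)).toNat = N + 1 by omega] at ihr
      have hlen := splitW_length sub hsub (N + 1) rest
      by_cases hc : ((splitW sub hsub (N + 1) rest).length : Int) + 1 ≤ ((N + 1 : Nat) : Int) + 1
      · rw [List.length_cons, if_pos (by push_cast at hc ⊢; omega)]
        have hocc : (occW sub hsub rest).length ≤ N := by
          by_cases hbig : N + 1 ≤ (occW sub hsub rest).length
          · exfalso
            rw [hlen] at hc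
            push_cast at hc
            omega
          · omega
        simp only [occIdx, List.getElem?_cons_succ]
        rw [List.getElem?_eq_none (by simp; omega)]
      · rw [List.length_cons, if_neg (by push_cast at hc ⊢; omega)]
        have hocc : N < (occW sub hsub rest).length := by
          rw [hlen] at hc
          push_cast at hc
          omega
        rw [if_neg (by push_cast; rw [hlen]; push_cast; omega)] at ihr
        have hne : splitW sub hsub (N + 1) rest ≠ [] := splitW_ne_nil _ _ _ _
        have hlast : (PySem.List.pyGet? (List.take (PySem.Chars.find s sub).toNat s ::
            splitW sub hsub (N + 1) rest) (-1)).getD [] =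
            (PySem.List.pyGet? (splitW sub hsub (N + 1) rest) (-1)).getD [] := by
          show PySem.List.pyGetD _ _ _ = PySem.List.pyGetD _ _ _
          rw [PySem.List.pyGetD_neg_one _ _ (by simp), PySem.List.pyGetD_neg_one _ _ hne]
          exact List.getLast_cons hne
        rw [hlast]
        have hrlen : rest.length = s.length - ((PySem.Chars.find s sub).toNat + sub.length) := by
          rw [hrest]; simp
        obtain ⟨v, hv⟩ : ∃ v, (occW sub hsub rest)[N]? = some v :=
          ⟨(occW sub hsub rest)[N]'hocc, List.getElem?_eq_getElem hocc⟩
        have hocc' : occIdx (occW sub hsub rest) N = (v : Int) := by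
          simp [occIdx, hv]
        have ihr' : ((s.length : Int) - ((PySem.Chars.find s sub).toNat + sub.length))
            - (((PySem.List.pyGet? (splitW sub hsub (N + 1) rest) (-1)).getD []).length : Int)
            - (sub.length : Int) = (v : Int) := by
          rw [← hocc', ← ihr, hrlen]
          omega
        simp only [occIdx, List.getElem?_cons_succ, List.getElem?_map, hv, Option.map_some]
        omega

-- ===== A-side shape: get_artists = map elemA over range(10) =====

def elemA (h : List Char) (k : Int) : List Char :=
  let s := PySem.Chars.slice h
      (some ((PySem.List.pyGet? ((PySem.List.pyRange 0 10 1).map (fun k => findnth h artistLit k)) k).getD 0))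
      (some ((PySem.List.pyGet? ((PySem.List.pyRange 0 10 1).map (fun k => findnth h caretLit k - 32)) k).getD 0))
  trimLoop s (PySem.Chars.find s ['\n'])

theorem foldl_build10 {α : Type} (f : Int → α) (step : List α → Int → List α)
    (hstep : ∀ (acc : List α) (k : Int), 0 ≤ k → acc.length = k.toNat → step acc k = acc ++ [f k]) :
    (PySem.List.pyRange 0 10 1).foldl step [] = (PySem.List.pyRange 0 10 1).map f := by
  rw [show PySem.List.pyRange 0 10 1 = [0,1,2,3,4,5,6,7,8,9] from rfl]
  simp only [List.foldl_cons, List.foldl_nil, List.map_cons, List.map_nil]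
  rw [hstep _ 0 (by norm_num) (by rfl)]
  rw [hstep _ 1 (by norm_num) (by rfl)]
  rw [hstep _ 2 (by norm_num) (by rfl)]
  rw [hstep _ 3 (by norm_num) (by rfl)]
  rw [hstep _ 4 (by norm_num) (by rfl)]
  rw [hstep _ 5 (by norm_num) (by rfl)]
  rw [hstep _ 6 (by norm_num) (by rfl)]
  rw [hstep _ 7 (by norm_num) (by rfl)]
  rw [hstep _ 8 (by norm_num) (by rfl)]
  rw [hstep _ 9 (by norm_num) (by rfl)]
  simp

theorem getmap10 (g : Int → Int) (j : Nat) (hj : j < 10) :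
    (PySem.List.pyGet? ((PySem.List.pyRange 0 10 1).map g) ((j : Nat) : Int)).getD 0
      = g ((j : Nat) : Int) := by
  rw [PySem.List.pyGet?_natCast, List.getElem?_map]
  have hr : (PySem.List.pyRange 0 10 1)[j]? = some ((j : Nat) : Int) := by
    interval_cases j <;> rfl
  rw [hr]
  rfl

theorem A_eq (html : String) :
    get_artists html
      = (PySem.List.pyRange 0 10 1).map (fun k => String.ofList (elemA html.toList k)) := by
  rw [get_artists]
  rw [PySem.List.foldl_prod_mk
    (f := fun acc k => PySem.List.insert acc k (findnth html.toList caretLit k - 32))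
    (g := fun acc k => PySem.List.insert acc k (findnth html.toList artistLit k))]
  rw [foldl_build10 (f := fun k => findnth html.toList caretLit k - 32)
    (step := fun acc k => PySem.List.insert acc k (findnth html.toList caretLit k - 32))
    (by
      intro acc k hk0 hlen
      have hk : k = ((acc.length : Nat) : Int) := by omega
      beta_reduce
      rw [hk, PySem.List.insert_length])]
  rw [foldl_build10 (f := fun k => findnth html.toList artistLit k)
    (step := fun acc k => PySem.List.insert acc k (findnth html.toList artistLit k))
    (by
      intro acc k hk0 hlen
      have hk : k = ((acc.length : Nat) : Int) := by omega
      beta_reduce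
      rw [hk, PySem.List.insert_length])]
  rw [foldl_build10 (f := fun k => elemA html.toList k)]
  · simp [List.map_map, Function.comp]
  · intro acc k hk0 hlen
    have hk : k = ((acc.length : Nat) : Int) := by omega
    dsimp only
    rw [hk]
    rw [PySem.List.insert_length]
    rw [show (((acc.length : Nat) : Int)).toNat = acc.length by omega]
    simp only [PySem.List.pyGet?_natCast, List.getElem?_concat_length, Option.getD_some]
    simp [elemA, PySem.List.pyGet?_natCast]

-- ===== B-side: the cursor invariant =====

-- the cursor value after the first j find-and-advance steps: just past the last of the
-- first j occurrences (0 when none found yet; it stops changing when occurrences run out)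
def curAfterN (occ : List Nat) (len : Nat) (j : Nat) : Nat :=
  match (occ.take j).getLast? with
  | none => 0
  | some p => p + len

theorem occW_mem_le (sub : List Char) (hsub : sub ≠ []) (s : List Char) :
    ∀ p ∈ occW sub hsub s, p + sub.length ≤ s.length := by
  induction s using occW.induct sub hsub with
  | case1 s f hf =>
    rw [occW, dif_pos hf]
    simp
  | case2 s f hf ih =>
    rw [occW, dif_neg hf]
    intro p hp
    have h0 : 0 ≤ PySem.Chars.find s sub := by
      have := PySem.Chars.neg_one_le_find s sub; omega
    obtain ⟨hp', -⟩ := PySem.Chars.find_spec h0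
    have hD : (PySem.Chars.find s sub).toNat + sub.length ≤ s.length := prefix_le_of_drop hsub hp'
    rcases List.mem_cons.1 hp with h | h
    · omega
    · obtain ⟨q, hq, rfl⟩ := List.mem_map.1 h
      have := ih q hq
      simp only [List.length_drop] at this
      omega

theorem curAfterN_zero (occ : List Nat) (len : Nat) : curAfterN occ len 0 = 0 := rfl

theorem occIdx_cons_zero (a : Nat) (t : List Nat) : occIdx (a :: t) 0 = (a : Int) := rfl

theorem occIdx_cons_succ (a : Nat) (t : List Nat) (j : Nat) :
    occIdx (a :: t) (j + 1) = occIdx t j := rfl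

theorem curAfterN_le (occ : List Nat) (len : Nat) (L : Nat)
    (hocc : ∀ p ∈ occ, p + len ≤ L) (j : Nat) : curAfterN occ len j ≤ L := by
  cases h : (occ.take j).getLast? with
  | none => unfold curAfterN; rw [h]; simp
  | some p =>
    have hp := hocc p (List.mem_of_mem_take (List.mem_of_getLast? h))
    unfold curAfterN; rw [h]; simp; omega

theorem curAfterN_cons (a len : Nat) (t : List Nat) (j : Nat) :
    curAfterN (a :: t.map (· + (a + len))) len (j + 1)
      = curAfterN t len j + (a + len) := by
  unfold curAfterN
  rw [List.take_succ_cons, ← List.map_take, List.getLast?_cons, List.getLast?_map]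
  cases h : (t.take j).getLast? with
  | none => simp
  | some q => simp; omega

theorem curAfterN_succ_lt (occ : List Nat) (len j : Nat) (hj : j < occ.length) :
    curAfterN occ len (j + 1) = occ[j] + len := by
  unfold curAfterN
  have hlen : (occ.take (j+1)).length = j + 1 := by
    simp [List.length_take]; omega
  rw [List.getLast?_eq_getElem?, hlen]
  simp only [Nat.add_sub_cancel]
  rw [List.getElem?_take_of_lt (by omega), List.getElem?_eq_getElem hj]

theorem curAfterN_succ_ge (occ : List Nat) (len j : Nat) (hj : occ.length ≤ j) :
    curAfterN occ len (j + 1) = curAfterN occ len j := by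
  unfold curAfterN
  rw [List.take_of_length_le (by omega), List.take_of_length_le (by omega)]

theorem occIdx_of_lt {occ : List Nat} {j : Nat} (hj : j < occ.length) :
    occIdx occ j = (occ[j] : Int) := by
  simp [occIdx, List.getElem?_eq_getElem hj]

theorem occIdx_of_ge {occ : List Nat} {j : Nat} (hj : occ.length ≤ j) :
    occIdx occ j = -1 := by
  simp [occIdx, List.getElem?_eq_none (by omega : occ.length ≤ j)]

theorem occIdx_neg_iff {occ : List Nat} {j : Nat} :
    occIdx occ j = -1 ↔ occ.length ≤ j := by
  constructor
  · intro h
    by_contra hc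
    rw [occIdx_of_lt (by omega)] at h
    omega
  · exact occIdx_of_ge

-- the cursor-based find returns exactly the j-th occurrence (or -1)
theorem findFrom_cursor (sub : List Char) (hsub : sub ≠ []) (s : List Char) :
    ∀ (j : Nat),
      PySem.Chars.findFrom s sub ((curAfterN (occW sub hsub s) sub.length j : Nat) : Int) none
        = occIdx (occW sub hsub s) j := by
  induction s using occW.induct sub hsub with
  | case1 s f hf =>
    intro j
    rw [occW, dif_pos hf]
    have : curAfterN ([] : List Nat) sub.length j = 0 := by
      unfold curAfterN; simp
    rw [this]
    simp only [Nat.cast_zero, PySem.Chars.findFrom_zero]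
    rw [show PySem.Chars.find s sub = f from rfl, hf]
    simp [occIdx]
  | case2 s f hf ih =>
    intro j
    have h0 : 0 ≤ PySem.Chars.find s sub := by
      have := PySem.Chars.neg_one_le_find s sub; omega
    obtain ⟨hp', -⟩ := PySem.Chars.find_spec h0
    have hD : (PySem.Chars.find s sub).toNat + sub.length ≤ s.length := prefix_le_of_drop hsub hp'
    rw [occW, dif_neg hf]
    cases j with
    | zero =>
      rw [curAfterN_zero, occIdx_cons_zero]
      simp only [Nat.cast_zero, PySem.Chars.findFrom_zero]
      omega
    | succ j =>
      set D := (PySem.Chars.find s sub).toNat + sub.length with hDdef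
      set s' := s.drop D with hs'
      set occ' := occW sub hsub s' with hocc'
      have hC : curAfterN ((PySem.Chars.find s sub).toNat :: occ'.map (· + D)) sub.length (j + 1)
          = curAfterN occ' sub.length j + D := by
        exact curAfterN_cons (PySem.Chars.find s sub).toNat sub.length occ' j
      rw [hC]
      have hble : curAfterN occ' sub.length j ≤ s'.length :=
        curAfterN_le _ _ _ (occW_mem_le sub hsub s') j
      have hbig : curAfterN occ' sub.length j + D ≤ s.length := by
        have : s'.length = s.length - D := by simp [hs']
        omega
      rw [PySem.Chars.findFrom_natCast s sub _ hbig]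
      have ihj := ih j
      rw [PySem.Chars.findFrom_natCast s' sub _ hble] at ihj
      have hdrop : s.drop (curAfterN occ' sub.length j + D) = s'.drop (curAfterN occ' sub.length j) := by
        rw [hs', List.drop_drop, Nat.add_comm]
      rw [hdrop]
      rw [occIdx_cons_succ]
      by_cases hfind : PySem.Chars.find (s'.drop (curAfterN occ' sub.length j)) sub = -1
      · rw [if_pos hfind]
        rw [if_pos hfind] at ihj
        have hlen : occ'.length ≤ j := occIdx_neg_iff.1 ihj.symm
        rw [occIdx_of_ge (by simp; omega)]
      · rw [if_neg hfind]
        rw [if_neg hfind] at ihj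
        set i := PySem.Chars.find (s'.drop (curAfterN occ' sub.length j)) sub with hi
        have hi0 : 0 ≤ i := by
          have := PySem.Chars.neg_one_le_find (s'.drop (curAfterN occ' sub.length j)) sub
          omega
        have hjlt : j < occ'.length := by
          by_contra hc
          rw [occIdx_of_ge (by omega)] at ihj
          omega
        rw [occIdx_of_lt hjlt] at ihj
        have hmj : j < (occ'.map (· + D)).length := by simp; omega
        rw [occIdx_of_lt hmj]
        simp only [List.getElem_map]
        push_cast
        push_cast at ihj
        omega

-- ===== B-side shape: the fold produces map pieceF over range 10 =====

def pieceF (h : List Char) (j : Nat) : List Char :=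
  let s := PySem.Chars.slice h
      (some (occIdx (occW artistLit (by decide) h) j))
      (some (occIdx (occW caretLit (by decide) h) j - 32))
  trimLoop s (PySem.Chars.find s ['\n'])

def stState (h : List Char) (j : Nat) : Int × Int × List (List Char) :=
  (((curAfterN (occW artistLit (by decide) h) artistLit.length j : Nat) : Int),
   ((curAfterN (occW caretLit (by decide) h) caretLit.length j : Nat) : Int),
   (List.range j).map (pieceF h))

theorem stepLemma (h : List Char) (j : Nat) (x : Int) :
    loopBody h (stState h j) x = stState h (j + 1) := by
  unfold loopBody stState
  simp only
  rw [findFrom_cursor artistLit (by decide) h j, findFrom_cursor caretLit (by decide) h j]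
  have hA : (if 0 ≤ occIdx (occW artistLit (by decide) h) j
        then occIdx (occW artistLit (by decide) h) j + (artistLit.length : Int)
        else ((curAfterN (occW artistLit (by decide) h) artistLit.length j : Nat) : Int))
      = ((curAfterN (occW artistLit (by decide) h) artistLit.length (j+1) : Nat) : Int) := by
    by_cases hj : j < (occW artistLit (by decide) h).length
    · rw [occIdx_of_lt hj, if_pos (by positivity), curAfterN_succ_lt _ _ _ hj]
      push_cast; ring
    · rw [occIdx_of_ge (by omega), if_neg (by omega), curAfterN_succ_ge _ _ _ (by omega)]
  have hC : (if 0 ≤ occIdx (occW caretLit (by decide) h) j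
        then occIdx (occW caretLit (by decide) h) j + (caretLit.length : Int)
        else ((curAfterN (occW caretLit (by decide) h) caretLit.length j : Nat) : Int))
      = ((curAfterN (occW caretLit (by decide) h) caretLit.length (j+1) : Nat) : Int) := by
    by_cases hj : j < (occW caretLit (by decide) h).length
    · rw [occIdx_of_lt hj, if_pos (by positivity), curAfterN_succ_lt _ _ _ hj]
      push_cast; ring
    · rw [occIdx_of_ge (by omega), if_neg (by omega), curAfterN_succ_ge _ _ _ (by omega)]
  rw [hA, hC, List.range_succ, List.map_append]
  rfl

theorem B_eq (html : String) :
    get_artists_alt html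
      = (List.range 10).map (fun j => String.ofList (pieceF html.toList j)) := by
  rw [get_artists_alt]
  rw [show PySem.List.pyRange 0 10 1 = [0,1,2,3,4,5,6,7,8,9] from rfl]
  simp only [List.foldl_cons, List.foldl_nil]
  have h0 : ((0 : Int), (0 : Int), ([] : List (List Char))) = stState html.toList 0 := by
    unfold stState curAfterN
    simp
  rw [h0, stepLemma, stepLemma, stepLemma, stepLemma, stepLemma, stepLemma, stepLemma,
    stepLemma, stepLemma, stepLemma]
  show ((List.range 10).map (pieceF html.toList)).map (fun cs => String.ofList cs) = _
  rw [List.map_map]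
  rfl

-- ===== combining =====

theorem map10cast {α : Type} (f : Nat → α) :
    (PySem.List.pyRange 0 10 1).map (fun k : Int => f k.toNat) = (List.range 10).map f := by
  rw [show PySem.List.pyRange 0 10 1 = [0,1,2,3,4,5,6,7,8,9] from rfl]
  rw [show List.range 10 = [0,1,2,3,4,5,6,7,8,9] from rfl]
  rfl

theorem elemA_eq (h : List Char) (k : Int) (h0 : 0 ≤ k) (h10 : k < 10) :
    elemA h k = pieceF h k.toNat := by
  have hj : k = ((k.toNat : Nat) : Int) := by omega
  have hj10 : k.toNat < 10 := by omega
  rw [hj]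
  show trimLoop _ (PySem.Chars.find _ ['\n']) = _
  rw [getmap10 _ k.toNat hj10, getmap10 _ k.toNat hj10]
  rw [findnth_eq_occIdx artistLit (by decide) k.toNat h]
  rw [findnth_eq_occIdx caretLit (by decide) k.toNat h]
  rfl

theorem get_artists_main (html : String) : get_artists html = get_artists_alt html := by
  rw [A_eq, B_eq, ← map10cast (fun j => String.ofList (pieceF html.toList j))]
  refine List.map_congr_left fun k hk => ?_
  have hm := (PySem.List.mem_pyRange_one).1 hk
  exact congrArg String.ofList (elemA_eq html.toList k hm.1 hm.2)

-- ===== VERDICT (by name: the statement is the Claim_ definition above) =====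
theorem get_artists_spec : Claim_equal_get_artists := fun html _ => get_artists_main html
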